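-- pv_equiv track=rewrite | github.com/limseunghyun95/coding_test | hackerrank/problem_solving/picking_numbers.py | pickingNumbers
-- ===== SOURCE A (Python) =====
-- def pickingNumbers(a):
--     a.sort()
--
--     max_subarr_size = -1
--     current_subarr_size = 1
--     stand = a[0]
--     for e in a[1:]:
--         if e - stand <= 1:
--             current_subarr_size += 1
--         else:
--             max_subarr_size = max(max_subarr_size, current_subarr_size)
--             current_subarr_size = 1
--             stand = e
--
--     return max(max_subarr_size, current_subarr_size)
-- ===== SOURCE B (Python) =====
-- def pickingNumbers(a):
--     a.sort()
--     best = 0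
--     i = 0
--     n = len(a)
--     while i < n:
--         # binary search for the first index whose value is more than a[i] + 1
--         lo, hi = i + 1, n
--         while lo < hi:
--             mid = (lo + hi) // 2
--             if a[mid] - a[i] <= 1:
--                 lo = mid + 1
--             else:
--                 hi = mid
--         best = max(best, lo - i)
--         i = lo
--     return best
-- ===== Notes on version B (the rewrite author's own statement) =====
-- stated objective: alternative
-- what changed: Replaces A's element-by-element scan with running current/max/stand accumulators by a window jumper: after sorting, each window's end is located by a hand-rolled binary search for the first value exceeding window_start+1, the window length is taken as an index difference, and the scan resumes at that end; Pre_ excludes only the empty list, on which A raises IndexError.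
import Mathlib
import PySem

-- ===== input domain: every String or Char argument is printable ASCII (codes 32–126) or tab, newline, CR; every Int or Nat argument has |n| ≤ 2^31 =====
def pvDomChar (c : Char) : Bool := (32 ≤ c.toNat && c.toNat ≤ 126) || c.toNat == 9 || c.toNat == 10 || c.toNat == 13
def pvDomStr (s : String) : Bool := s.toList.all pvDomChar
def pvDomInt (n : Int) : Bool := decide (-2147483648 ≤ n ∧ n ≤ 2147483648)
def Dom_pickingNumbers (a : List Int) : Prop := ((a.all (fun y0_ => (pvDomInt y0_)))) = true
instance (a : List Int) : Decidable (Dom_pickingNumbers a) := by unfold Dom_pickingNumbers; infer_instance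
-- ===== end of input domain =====

-- B replaces A's accumulator scan by sort + a binary search locating each window's end; both A and B
-- sort `a` in place (same argument mutation); the equivalence proved is about the return value.

-- ===== PORT A =====
-- the for-loop of A over a[1:] with state (max_subarr_size, current_subarr_size, stand)
def pickingNumbersLoop : List Int → Int → Int → Int → Int
  | [], maxS, cur, _ => max maxS cur
  | e :: rest, maxS, cur, stand =>
    if e - stand ≤ 1 then pickingNumbersLoop rest maxS (cur + 1) stand
    else pickingNumbersLoop rest (max maxS cur) 1 e

def pickingNumbers (a : List Int) : Int :=
  match PySem.List.sorted a (fun x => x) false with   -- a.sort()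
  | [] => 0                                           -- a[0] raises IndexError: outside Pre_
  | stand :: rest => pickingNumbersLoop rest (-1) 1 stand

-- ===== PORT B =====
-- the inner 'while lo < hi' binary-search loop of B, with fuel = the loop variant hi - lo
-- (each pass shrinks hi - lo by at least one, so the guard is false whenever fuel runs out);
-- a[mid] is always in range when B runs it
def pnBisect (s : List Int) (ai : Int) : Nat → Int → Int → Int
  | 0, lo, _ => lo
  | fuel + 1, lo, hi =>
    if lo < hi then
      if PySem.List.pyGetD s (PySem.Int.floordiv (lo + hi) 2) 0 - ai ≤ 1 then
        pnBisect s ai fuel (PySem.Int.floordiv (lo + hi) 2 + 1) hi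
      else
        pnBisect s ai fuel lo (PySem.Int.floordiv (lo + hi) 2)
    else lo

-- the outer 'while i < n' loop of B with state (i, best), fuel = the loop variant n - i
def pnScan (s : List Int) (n : Int) : Nat → Int → Int → Int
  | 0, _, best => best
  | fuel + 1, i, best =>
    if i < n then
      pnScan s n fuel (pnBisect s (PySem.List.pyGetD s i 0) (n - (i + 1)).toNat (i + 1) n)
        (max best (pnBisect s (PySem.List.pyGetD s i 0) (n - (i + 1)).toNat (i + 1) n - i))
    else best

def pickingNumbers_alt (a : List Int) : Int :=
  let s := PySem.List.sorted a (fun x => x) false     -- a.sort()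
  pnScan s (s.length : Int) s.length 0 0              -- n = len(a); best = 0; i = 0

-- ===== PRECONDITION & SPEC =====
-- Pre_ excludes only the empty list, on which A raises IndexError.
def Pre_pickingNumbers (a : List Int) : Prop := a ≠ []
instance (a : List Int) : Decidable (Pre_pickingNumbers a) := by unfold Pre_pickingNumbers; infer_instance
def pvWitness_pickingNumbers : List Int := ([4, 6, 5, 3, 3, 1])

def Spec_pickingNumbers (a : List Int) (out : Int) : Prop := out = pickingNumbers_alt a
instance (a : List Int) (out : Int) : Decidable (Spec_pickingNumbers a out) := by unfold Spec_pickingNumbers; infer_instance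

-- ===== CLAIM (what is proved, stated in full; the proofs are below) =====
def Claim_equal_pickingNumbers : Prop := ∀ (a : List Int), Dom_pickingNumbers a → Pre_pickingNumbers a → Spec_pickingNumbers a (pickingNumbers a)

-- ===== LEMMAS AND PROOFS =====

-- the greedy runs skeleton shared by both proofs
def pvRuns : List Int → Int → Int
  | [], m => m
  | h :: t, m =>
      pvRuns (t.dropWhile (fun e => decide (e ≤ h + 1)))
        (max m (1 + ((t.takeWhile (fun e => decide (e ≤ h + 1))).length : Int)))
  termination_by l _ => l.length
  decreasing_by
    simp only [List.length_cons]
    exact Nat.lt_succ_of_le (t.length_dropWhile_le _)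

theorem loopA_eq (t : List Int) : ∀ (m cur stand : Int),
    pickingNumbersLoop t m cur stand =
      pvRuns (t.dropWhile (fun e => decide (e ≤ stand + 1)))
        (max m (cur + ((t.takeWhile (fun e => decide (e ≤ stand + 1))).length : Int))) := by
  induction t with
  | nil => intro m cur stand; simp [pickingNumbersLoop, pvRuns]
  | cons e rest ih =>
      intro m cur stand
      rw [List.takeWhile_cons, List.dropWhile_cons]
      by_cases he : e - stand ≤ 1
      · have he' : e ≤ stand + 1 := by omega
        simp only [pickingNumbersLoop, if_pos he, he', decide_true, if_true, List.length_cons]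
        rw [ih]
        congr 2
        push_cast
        ring
      · have he' : ¬ (e ≤ stand + 1) := by omega
        simp only [pickingNumbersLoop, if_neg he, he', decide_false, Bool.false_eq_true, if_false,
          List.length_nil]
        rw [ih]
        have hrw : pvRuns (e :: rest) (max m cur) =
            pvRuns (rest.dropWhile (fun x => decide (x ≤ e + 1)))
              (max (max m cur) (1 + ((rest.takeWhile (fun x => decide (x ≤ e + 1))).length : Int))) := by
          simp [pvRuns]
        simp only [Nat.cast_zero, add_zero]
        rw [hrw]

-- indices of the takeWhile prefix satisfy the predicate; the first index after it does not
theorem takeWhile_idx₁' (p : Int → Bool) : ∀ (l : List Int) (k : Nat),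
    k < (l.takeWhile p).length → p (l.getD k 0) = true := by
  intro l
  induction l with
  | nil => intro k hk; simp at hk
  | cons x t ih =>
      intro k hk
      rw [List.takeWhile_cons] at hk
      by_cases hx : p x = true
      · rw [if_pos hx] at hk
        cases k with
        | zero => simpa using hx
        | succ k' =>
            simp only [List.length_cons] at hk
            have := ih k' (by omega)
            simpa using this
      · rw [if_neg hx] at hk
        simp at hk

theorem takeWhile_idx₁ (p : Int → Bool) (l : List Int) (k : Nat) (hkl : k < l.length)
    (hk : k < (l.takeWhile p).length) : p (l[k]'hkl) = true := by
  have := takeWhile_idx₁' p l k hk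
  rwa [List.getD_eq_getElem l 0 hkl] at this

theorem takeWhile_idx₂' (p : Int → Bool) : ∀ (l : List Int),
    (l.takeWhile p).length < l.length → p (l.getD (l.takeWhile p).length 0) = false := by
  intro l
  induction l with
  | nil => intro h; simp at h
  | cons x t ih =>
      intro h
      by_cases hx : p x = true
      · have hrw : (x :: t).takeWhile p = x :: t.takeWhile p := by
          rw [List.takeWhile_cons, if_pos hx]
        rw [hrw] at h ⊢
        simp only [List.length_cons] at h ⊢
        have := ih (by omega)
        simpa using this
      · have hrw : (x :: t).takeWhile p = [] := by
          rw [List.takeWhile_cons, if_neg hx]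
        rw [hrw] at h ⊢
        simpa using hx

theorem takeWhile_idx₂ (p : Int → Bool) (l : List Int) (h : (l.takeWhile p).length < l.length) :
    p (l[(l.takeWhile p).length]'h) = false := by
  have := takeWhile_idx₂' p l h
  rwa [List.getD_eq_getElem l 0 h] at this

-- binary-search midpoint bounds
theorem pnMid_bounds (lo hi : Int) (h : lo < hi) :
    lo ≤ PySem.Int.floordiv (lo + hi) 2 ∧ PySem.Int.floordiv (lo + hi) 2 < hi := by
  constructor
  · exact (PySem.Int.floordiv_two_mid_bounds (le_of_lt h)).1
  · rw [PySem.Int.floordiv_lt_iff_lt_mul (by omega)]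
    omega

-- sortedness gives index monotonicity
theorem sorted_getElem_mono (s : List Int) (hs : s.Pairwise (· ≤ ·)) (p q : Nat)
    (hpq : p ≤ q) (hq : q < s.length) : s[p]'(by omega) ≤ s[q] := by
  rcases Nat.lt_or_ge p q with hlt | hge
  · exact (List.pairwise_iff_getElem.mp hs) p q (by omega) hq hlt
  · have : p = q := by omega
    subst this
    exact le_refl _

-- pnBisect computes the end of the window: i + 1 + (length of the ≤ s[i]+1 prefix of s.drop (i+1))
theorem pnBisect_eq (s : List Int) (hs : s.Pairwise (· ≤ ·)) (i : Nat) (hi : i < s.length) :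
    ∀ (k : Nat) (lo hi' : Int), (hi' - lo).toNat ≤ k →
    (i : Int) + 1 ≤ lo →
    lo ≤ (i : Int) + 1 + (((s.drop (i + 1)).takeWhile (fun e => decide (e ≤ s[i] + 1))).length : Int) →
    (i : Int) + 1 + (((s.drop (i + 1)).takeWhile (fun e => decide (e ≤ s[i] + 1))).length : Int) ≤ hi' →
    hi' ≤ (s.length : Int) →
    pnBisect s (s[i]) k lo hi' = (i : Int) + 1 + (((s.drop (i + 1)).takeWhile (fun e => decide (e ≤ s[i] + 1))).length : Int) := by
  have hTlen : ((s.drop (i + 1)).takeWhile (fun e => decide (e ≤ s[i] + 1))).length ≤ s.length - (i + 1) := by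
    have h1 := (List.takeWhile_sublist (p := fun e => decide (e ≤ s[i] + 1)) (l := s.drop (i + 1))).length_le
    simpa using h1
  -- all indices in [i+1, B) carry values ≤ s[i]+1; index B (if < length) carries a larger value
  have hin : ∀ (j : Nat), i + 1 ≤ j → (j : Int) < (i : Int) + 1 + (((s.drop (i + 1)).takeWhile (fun e => decide (e ≤ s[i] + 1))).length : Int) → ∀ (hj : j < s.length), s[j] ≤ s[i] + 1 := by
    intro j hj1 hj2 hj
    have hk : j - (i + 1) < ((s.drop (i + 1)).takeWhile (fun e => decide (e ≤ s[i] + 1))).length := by omega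
    have hkl : j - (i + 1) < (s.drop (i + 1)).length := by
      simp only [List.length_drop]; omega
    have := takeWhile_idx₁ (fun e => decide (e ≤ s[i] + 1)) (s.drop (i + 1)) (j - (i + 1)) hkl hk
    rw [List.getElem_drop] at this
    have hje : i + 1 + (j - (i + 1)) = j := by omega
    simp only [hje] at this
    simpa using this
  have hout : ∀ (hB : i + 1 + ((s.drop (i + 1)).takeWhile (fun e => decide (e ≤ s[i] + 1))).length < s.length),
      ¬ (s[i + 1 + ((s.drop (i + 1)).takeWhile (fun e => decide (e ≤ s[i] + 1))).length]'hB ≤ s[i] + 1) := by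
    intro hB
    have hlt : ((s.drop (i + 1)).takeWhile (fun e => decide (e ≤ s[i] + 1))).length < (s.drop (i + 1)).length := by
      simp only [List.length_drop]; omega
    have := takeWhile_idx₂ (fun e => decide (e ≤ s[i] + 1)) (s.drop (i + 1)) hlt
    rw [List.getElem_drop] at this
    simpa using this
  intro k
  induction k with
  | zero =>
      intro lo hi' hk h1 h2 h3 h4
      simp only [pnBisect]
      omega
  | succ k ih =>
      intro lo hi' hk h1 h2 h3 h4
      simp only [pnBisect]
      by_cases hlh : lo < hi'
      · rw [if_pos hlh]
        have hmid := pnMid_bounds lo hi' hlh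
        set mid := PySem.Int.floordiv (lo + hi') 2 with hmiddef
        have hmid0 : 0 ≤ mid := by omega
        have hmidlen : mid < (s.length : Int) := by omega
        have hget : PySem.List.pyGetD s mid 0 = s[mid.toNat]'(by omega) :=
          PySem.List.pyGetD_eq_getElem s 0 hmid0 hmidlen
        by_cases hcond : PySem.List.pyGetD s mid 0 - s[i] ≤ 1
        · rw [if_pos hcond]
          -- mid is inside the window: mid + 1 ≤ B
          have hmlt : mid < (i : Int) + 1 + (((s.drop (i + 1)).takeWhile (fun e => decide (e ≤ s[i] + 1))).length : Int) := by
            by_contra hge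
            push_neg at hge
            have hBlt : i + 1 + ((s.drop (i + 1)).takeWhile (fun e => decide (e ≤ s[i] + 1))).length < s.length := by omega
            have h5 := hout hBlt
            have h6 : s[i + 1 + ((s.drop (i + 1)).takeWhile (fun e => decide (e ≤ s[i] + 1))).length]'hBlt ≤ s[mid.toNat]'(by omega) :=
              sorted_getElem_mono s hs _ _ (by omega) (by omega)
            rw [hget] at hcond
            omega
          exact ih (mid + 1) hi' (by omega) (by omega) (by omega) h3 h4
        · rw [if_neg hcond]
          -- mid is past the window: B ≤ mid
          have hmge : (i : Int) + 1 + (((s.drop (i + 1)).takeWhile (fun e => decide (e ≤ s[i] + 1))).length : Int) ≤ mid := by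
            by_contra hlt2
            push_neg at hlt2
            have h5 := hin mid.toNat (by omega) (by omega) (by omega)
            rw [hget] at hcond
            omega
          exact ih lo mid (by omega) h1 h2 hmge (by omega)
      · rw [if_neg hlh]
        omega

-- dropWhile is drop of the takeWhile length
theorem dropWhile_eq_drop (p : Int → Bool) : ∀ (l : List Int),
    l.dropWhile p = l.drop (l.takeWhile p).length := by
  intro l
  induction l with
  | nil => rfl
  | cons x t ih =>
      rw [List.dropWhile_cons, List.takeWhile_cons]
      by_cases hx : p x = true
      · rw [if_pos hx, if_pos hx, ih]
        simp
      · rw [if_neg hx, if_neg hx]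
        simp

-- the outer loop walks the greedy runs
theorem pnScan_eq (s : List Int) (hs : s.Pairwise (· ≤ ·)) :
    ∀ (k : Nat) (i : Nat) (best : Int), s.length - i ≤ k →
    pnScan s (s.length : Int) k (i : Int) best = pvRuns (s.drop i) best := by
  intro k
  induction k with
  | zero =>
      intro i best hk
      simp only [pnScan]
      rw [List.drop_eq_nil_of_le (by omega)]
      simp [pvRuns]
  | succ k ih =>
      intro i best hk
      simp only [pnScan]
      by_cases hi : (i : Int) < (s.length : Int)
      · rw [if_pos hi]
        have hilen : i < s.length := by omega
        have hget : PySem.List.pyGetD s (i : Int) 0 = s[i] := by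
          have := PySem.List.pyGetD_eq_getElem s (i := (i : Int)) 0 (by omega) hi
          simpa using this
        have hTlen : ((s.drop (i + 1)).takeWhile (fun e => decide (e ≤ s[i] + 1))).length ≤ s.length - (i + 1) := by
          have h1 := (List.takeWhile_sublist (p := fun e => decide (e ≤ s[i] + 1)) (l := s.drop (i + 1))).length_le
          simpa using h1
        have hbis : pnBisect s (PySem.List.pyGetD s (i : Int) 0) (((s.length : Int) - ((i : Int) + 1)).toNat) ((i : Int) + 1) (s.length : Int) =
            (i : Int) + 1 + (((s.drop (i + 1)).takeWhile (fun e => decide (e ≤ s[i] + 1))).length : Int) := by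
          rw [hget]
          exact pnBisect_eq s hs i hilen ((s.length : Int) - ((i : Int) + 1)).toNat _ _
            (le_refl _) (le_refl _) (by omega) (by omega) (le_refl _)
        have hdrop : s.drop i = s[i] :: s.drop (i + 1) := List.drop_eq_getElem_cons hilen
        have hstep : ∀ (x : Int) (l : List Int) (b : Int), pvRuns (x :: l) b =
            pvRuns (l.dropWhile (fun e => decide (e ≤ x + 1)))
              (max b (1 + ((l.takeWhile (fun e => decide (e ≤ x + 1))).length : Int))) := by
          intro x l b
          simp [pvRuns]
        rw [hbis, hdrop, hstep]
        have hdd : (s.drop (i + 1)).dropWhile (fun e => decide (e ≤ s[i] + 1)) =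
            s.drop (i + 1 + ((s.drop (i + 1)).takeWhile (fun e => decide (e ≤ s[i] + 1))).length) := by
          rw [dropWhile_eq_drop, List.drop_drop]
        have hcast : (i : Int) + 1 + (((s.drop (i + 1)).takeWhile (fun e => decide (e ≤ s[i] + 1))).length : Int) =
            ((i + 1 + ((s.drop (i + 1)).takeWhile (fun e => decide (e ≤ s[i] + 1))).length : Nat) : Int) := by
          push_cast; ring
        rw [hcast]
        rw [ih (i + 1 + ((s.drop (i + 1)).takeWhile (fun e => decide (e ≤ s[i] + 1))).length) _ (by omega)]
        rw [hdd]
        congr 2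
        push_cast
        ring
      · rw [if_neg hi]
        rw [List.drop_eq_nil_of_le (by omega)]
        simp [pvRuns]

-- A on a nonempty list equals pvRuns of the sorted list started at -1; shifting the start to 0 is free
theorem pvRuns_start (h : Int) (t : List Int) : pvRuns (h :: t) (-1) = pvRuns (h :: t) 0 := by
  have h1 : pvRuns (h :: t) (-1 : Int) =
      pvRuns (t.dropWhile (fun e => decide (e ≤ h + 1)))
        (max (-1) (1 + ((t.takeWhile (fun e => decide (e ≤ h + 1))).length : Int))) := by
    simp [pvRuns]
  have h2 : pvRuns (h :: t) (0 : Int) =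
      pvRuns (t.dropWhile (fun e => decide (e ≤ h + 1)))
        (max 0 (1 + ((t.takeWhile (fun e => decide (e ≤ h + 1))).length : Int))) := by
    simp [pvRuns]
  rw [h1, h2]
  have hm : max (-1 : Int) (1 + ((t.takeWhile (fun e => decide (e ≤ h + 1))).length : Int)) =
      max 0 (1 + ((t.takeWhile (fun e => decide (e ≤ h + 1))).length : Int)) := by
    have h0 : (0 : Int) ≤ ((t.takeWhile (fun e => decide (e ≤ h + 1))).length : Int) := by positivity
    omega
  rw [hm]

-- ===== VERDICT (by name: the statement is the Claim_ definition above) =====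
theorem pickingNumbers_spec : Claim_equal_pickingNumbers := by
  intro a _ hpre
  unfold Spec_pickingNumbers
  unfold pickingNumbers pickingNumbers_alt
  cases hse : PySem.List.sorted a (fun x => x) false with
  | nil =>
      rw [PySem.List.sorted_eq_nil_iff] at hse
      exact absurd hse hpre
  | cons h t =>
      have hsp : (h :: t).Pairwise (· ≤ ·) := by
        have hp := PySem.List.sorted_pairwise (xs := a) (key := fun x => x)
        rw [hse] at hp
        exact hp
      show pickingNumbersLoop t (-1) 1 h = pnScan (h :: t) ((h :: t).length : Int) (h :: t).length 0 0
      have hB : pnScan (h :: t) ((h :: t).length : Int) (h :: t).length ((0 : Nat) : Int) 0 = pvRuns ((h :: t).drop 0) 0 :=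
        pnScan_eq (h :: t) hsp (h :: t).length 0 0 (by omega)
      simp only [Nat.cast_zero, List.drop_zero] at hB
      rw [hB]
      rw [loopA_eq]
      rw [← pvRuns_start]
      have : pvRuns (h :: t) (-1 : Int) =
          pvRuns (t.dropWhile (fun e => decide (e ≤ h + 1)))
            (max (-1) (1 + ((t.takeWhile (fun e => decide (e ≤ h + 1))).length : Int))) := by
        simp [pvRuns]
      rw [this]
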